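-- pv_equiv track=rewrite | github.com/vast-data/vast-admin-mcp | src/vast_admin_mcp/utils.py | normalize_field_name
-- ===== SOURCE A (Python) =====
-- def normalize_field_name(field_name: str, direction: str = 'to_underscore') -> str:
--     """Normalize field name between space-separated and underscore-separated formats.
--
--     Args:
--         field_name: Field name to normalize
--         direction: 'to_underscore' (default) converts "logical used" -> "logical_used",
--                    'to_space' converts "logical_used" -> "logical used"
--
--     Returns:
--         Normalized field name
--     """
--     if direction == 'to_underscore':
--         # Replace spaces and hyphens with underscores
--         normalized = field_name.replace(' ', '_').replace('-', '_')
--         # Remove multiple consecutive underscores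
--         while '__' in normalized:
--             normalized = normalized.replace('__', '_')
--         # Remove leading/trailing underscores
--         normalized = normalized.strip('_')
--         return normalized
--     elif direction == 'to_space':
--         # Replace underscores with spaces
--         normalized = field_name.replace('_', ' ').replace('-', ' ')
--         # Remove multiple consecutive spaces
--         while '  ' in normalized:
--             normalized = normalized.replace('  ', ' ')
--         # Remove leading/trailing spaces
--         normalized = normalized.strip()
--         return normalized
--     else:
--         raise ValueError(f"Invalid direction: {direction}. Must be 'to_underscore' or 'to_space'")
-- ===== SOURCE B (Python) =====
-- def normalize_field_name(field_name: str, direction: str = 'to_underscore') -> str: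
--     """Single-pass normalization: map every separator (space/hyphen/underscore)
--     to the target separator while skipping repeats, then strip the edges."""
--     if direction == 'to_underscore':
--         sep = '_'
--     elif direction == 'to_space':
--         sep = ' '
--     else:
--         raise ValueError(f"Invalid direction: {direction}. Must be 'to_underscore' or 'to_space'")
--     out = []
--     prev_sep = False
--     for ch in field_name:
--         if ch == ' ' or ch == '-' or ch == '_':
--             if not prev_sep:
--                 out.append(sep)
--             prev_sep = True
--         else:
--             out.append(ch)
--             prev_sep = False
--     s = ''.join(out)
--     return s.strip('_') if direction == 'to_underscore' else s.strip()
-- ===== Notes on version B (the rewrite author's own statement) =====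
-- stated objective: idiomatic
-- what changed: Replaces A's chain of character replacements plus the repeated collapse-doubles while-loop with a single left-to-right pass that maps every separator character to the target separator while skipping repeats, then strips the edges.
import Mathlib
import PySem

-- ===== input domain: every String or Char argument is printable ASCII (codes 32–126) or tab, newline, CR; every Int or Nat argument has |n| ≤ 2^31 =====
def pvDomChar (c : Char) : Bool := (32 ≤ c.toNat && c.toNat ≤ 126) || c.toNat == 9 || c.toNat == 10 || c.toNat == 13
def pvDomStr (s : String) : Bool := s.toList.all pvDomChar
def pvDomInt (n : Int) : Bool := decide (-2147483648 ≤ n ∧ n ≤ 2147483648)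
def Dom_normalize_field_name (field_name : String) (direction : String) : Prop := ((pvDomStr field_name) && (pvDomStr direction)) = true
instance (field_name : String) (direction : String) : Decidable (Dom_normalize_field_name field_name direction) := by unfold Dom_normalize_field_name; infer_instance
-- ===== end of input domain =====

-- B replaces A's replace-chain plus while-collapse loop by one left-to-right pass that maps
-- every separator to the target and skips repeats; equivalence of return values is proved on
-- Pre_ (the two valid directions).

-- ===== PORT A =====
-- helper characterizing one pass of s.replace(sep+sep, sep) (left-to-right, non-overlapping),
-- needed only to justify termination of A's while loop below.
def pvPairRep (sep : Char) : List Char → List Char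
  | [] => []
  | [a] => [a]
  | a :: b :: t => if a = sep ∧ b = sep then sep :: pvPairRep sep t else a :: pvPairRep sep (b :: t)
  termination_by l => l.length

theorem pvPairRep_go (sep : Char) : ∀ (fuel : Nat) (l acc : List Char), l.length ≤ fuel →
    PySem.Chars.replace.go [sep, sep] [sep] fuel l acc = acc.reverse ++ pvPairRep sep l := by
  intro fuel
  induction fuel with
  | zero =>
    intro l acc h
    have : l = [] := by cases l <;> simp_all
    subst this; simp [PySem.Chars.replace.go, pvPairRep]
  | succ n ih =>
    intro l acc h
    match l with
    | [] => simp [PySem.Chars.replace.go, pvPairRep]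
    | [a] =>
      rw [PySem.Chars.replace.go]
      have hp : ([sep, sep].isPrefixOf [a]) = false := by simp [List.isPrefixOf]
      rw [if_neg (by simp [hp])]
      rw [ih [] (a :: acc) (by simp)]
      simp [pvPairRep]
    | a :: b :: t =>
      rw [PySem.Chars.replace.go]
      simp only [List.length_cons] at h
      by_cases hab : a = sep ∧ b = sep
      · have hpf : ([sep, sep].isPrefixOf (a :: b :: t)) = true := by
          simp [List.isPrefixOf, hab.1, hab.2]
        rw [if_pos hpf]
        rw [pvPairRep]; rw [if_pos hab]
        simp only [List.length_cons, List.drop_succ_cons, List.length_nil, List.drop_zero]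
        rw [ih t ([sep].reverse ++ acc) (by omega)]
        simp
      · have hpf : ([sep, sep].isPrefixOf (a :: b :: t)) = false := by
          simp [List.isPrefixOf]; intro ha hb; exact hab ⟨ha.symm, hb.symm⟩
        rw [if_neg (by simp [hpf])]
        rw [ih (b :: t) (a :: acc) (by simp; omega)]
        rw [pvPairRep]
        simp [hab]

theorem pvReplacePair_eq (sep : Char) (l : List Char) :
    PySem.Chars.replace l [sep, sep] [sep] = pvPairRep sep l := by
  rw [PySem.Chars.replace]
  simp only [List.isEmpty_cons, if_false, Bool.false_eq_true]
  exact pvPairRep_go sep l.length l [] le_rfl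

theorem pvPairRep_length_le (sep : Char) (l : List Char) :
    (pvPairRep sep l).length ≤ l.length := by
  induction l using pvPairRep.induct sep with
  | case1 => simp [pvPairRep]
  | case2 a => simp [pvPairRep]
  | case3 a b t hab ih =>
    rw [pvPairRep]; rw [if_pos hab]
    simp only [List.length_cons]
    omega
  | case4 a b t hab ih =>
    rw [pvPairRep]; rw [if_neg hab]
    simp only [List.length_cons]
    simp only [List.length_cons] at ih
    omega

theorem pvPairRep_length_lt (sep : Char) (l : List Char) (h : [sep, sep] <:+: l) :
    (pvPairRep sep l).length < l.length := by
  induction l using pvPairRep.induct sep with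
  | case1 => simp at h
  | case2 a =>
    exfalso
    obtain ⟨s, t, hst⟩ := h
    have := congrArg List.length hst; simp at this; omega
  | case3 a b t hab ih =>
    rw [pvPairRep]; rw [if_pos hab]
    simp only [List.length_cons]
    have := pvPairRep_length_le sep t; omega
  | case4 a b t hab ih =>
    rw [pvPairRep]; rw [if_neg hab]
    simp only [List.length_cons]
    have h' : [sep, sep] <:+: b :: t := by
      rcases List.infix_cons_iff.1 h with hp | hi
      · exfalso
        obtain ⟨s, hs⟩ := hp
        simp at hs
        exact hab ⟨hs.1.symm, hs.2.1.symm⟩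
      · exact hi
    have := ih h'
    simp only [List.length_cons] at this
    omega

theorem pvReplacePair_length_lt (sep : Char) (l : List Char)
    (h : PySem.Chars.isIn [sep, sep] l = true) :
    (PySem.Chars.replace l [sep, sep] [sep]).length < l.length := by
  rw [pvReplacePair_eq]
  exact pvPairRep_length_lt sep l ((PySem.Chars.isIn_iff_infix _ _).1 h)

-- A's while loop: while sep+sep in s: s = s.replace(sep+sep, sep)
def pvCollapseLoop (sep : Char) (s : List Char) : List Char :=
  if h : PySem.Chars.isIn [sep, sep] s = true then
    pvCollapseLoop sep (PySem.Chars.replace s [sep, sep] [sep])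
  else s
  termination_by s.length
  decreasing_by exact pvReplacePair_length_lt sep s h

def normalize_field_name (field_name : String) (direction : String) : String :=
  if direction == "to_underscore" then
    String.ofList (PySem.Chars.stripChars
      (pvCollapseLoop '_' (PySem.Str.replace (PySem.Str.replace field_name " " "_") "-" "_").toList)
      ['_'])
  else if direction == "to_space" then
    String.ofList (PySem.Chars.strip
      (pvCollapseLoop ' ' (PySem.Str.replace (PySem.Str.replace field_name "_" " ") "-" " ").toList))
  else
    field_name  -- unreachable under Pre_: Python raises ValueError here

-- ===== PORT B =====
-- one pass: map each separator to sep, skipping a separator that follows a separator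
def pvAltCore (sep : Char) (l : List Char) : List Char :=
  (l.foldl (fun (st : List Char × Bool) ch =>
      if ch == ' ' || ch == '-' || ch == '_' then
        (if st.2 then st.1 else st.1 ++ [sep], true)
      else
        (st.1 ++ [ch], false))
    ([], false)).1

def normalize_field_name_alt (field_name : String) (direction : String) : String :=
  if direction == "to_underscore" then
    String.ofList (PySem.Chars.stripChars (pvAltCore '_' field_name.toList) ['_'])
  else if direction == "to_space" then
    String.ofList (PySem.Chars.strip (pvAltCore ' ' field_name.toList))
  else
    field_name  -- unreachable under Pre_: Python raises ValueError here

-- ===== PRECONDITION & SPEC =====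
-- Pre_ excludes exactly the directions on which A (and B) raise ValueError.
def Pre_normalize_field_name (field_name : String) (direction : String) : Prop :=
  direction = "to_underscore" ∨ direction = "to_space"
instance (field_name : String) (direction : String) : Decidable (Pre_normalize_field_name field_name direction) := by unfold Pre_normalize_field_name; infer_instance

def pvWitness_normalize_field_name : String × String := ("logical used", "to_underscore")

def Spec_normalize_field_name (field_name : String) (direction : String) (out : String) : Prop := out = normalize_field_name_alt field_name direction
instance (field_name : String) (direction : String) (out : String) : Decidable (Spec_normalize_field_name field_name direction out) := by unfold Spec_normalize_field_name; infer_instance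

-- ===== CLAIM (what is proved, stated in full; the proofs are below) =====
def Claim_equal_normalize_field_name : Prop := ∀ (field_name : String) (direction : String), Dom_normalize_field_name field_name direction → Pre_normalize_field_name field_name direction → Spec_normalize_field_name field_name direction (normalize_field_name field_name direction)

-- ===== LEMMAS AND PROOFS =====

-- B's loop body as a structural recursion (p = "previous char was a separator")
def pvSq (sep : Char) (p : Bool) : List Char → List Char
  | [] => []
  | c :: t =>
    if c == ' ' || c == '-' || c == '_' then
      (if p then pvSq sep true t else sep :: pvSq sep true t)
    else c :: pvSq sep false t

theorem pvAltCore_foldl (sep : Char) :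
    ∀ (l acc : List Char) (p : Bool),
      (l.foldl (fun (st : List Char × Bool) ch =>
          if ch == ' ' || ch == '-' || ch == '_' then
            (if st.2 then st.1 else st.1 ++ [sep], true)
          else
            (st.1 ++ [ch], false))
        (acc, p)).1 = acc ++ pvSq sep p l := by
  intro l
  induction l with
  | nil => intro acc p; simp [pvSq]
  | cons c t ih =>
    intro acc p
    simp only [List.foldl_cons]
    rw [pvSq]
    by_cases hc : (c == ' ' || c == '-' || c == '_') = true
    · rw [if_pos hc, if_pos hc]
      cases p with
      | true => simp only [if_pos]; rw [ih acc true]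
      | false =>
        simp only [Bool.false_eq_true, if_false]
        rw [ih (acc ++ [sep]) true]; simp
    · rw [if_neg hc, if_neg hc]
      rw [ih (acc ++ [c]) false]; simp

theorem pvAltCore_eq_sq (sep : Char) (l : List Char) :
    pvAltCore sep l = pvSq sep false l := by
  rw [pvAltCore, pvAltCore_foldl sep l [] false]; simp

-- the collapse of runs of sep, on the already-mapped list
def pvCol (sep : Char) (p : Bool) : List Char → List Char
  | [] => []
  | c :: t =>
    if c = sep then (if p then pvCol sep true t else sep :: pvCol sep true t)
    else c :: pvCol sep false t

def pvToSep (sep : Char) (c : Char) : Char :=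
  if c == ' ' || c == '-' || c == '_' then sep else c

theorem pvSq_eq_col_map (sep : Char) (hsep : (sep == ' ' || sep == '-' || sep == '_') = true) :
    ∀ (l : List Char) (p : Bool), pvSq sep p l = pvCol sep p (l.map (pvToSep sep)) := by
  intro l
  induction l with
  | nil => intro p; simp [pvSq, pvCol]
  | cons c t ih =>
    intro p
    by_cases hc : (c == ' ' || c == '-' || c == '_') = true
    · rw [pvSq]; rw [if_pos hc]
      simp only [List.map_cons, pvToSep, hc, if_pos]
      rw [pvCol]; rw [if_pos rfl]
      cases p <;> simp [ih]
    · have hcs : c ≠ sep := by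
        intro h; subst h; exact hc hsep
      rw [pvSq]
      simp only [hc, Bool.false_eq_true, if_false]
      simp only [List.map_cons, pvToSep, hc, Bool.false_eq_true, if_false]
      rw [pvCol]; rw [if_neg hcs]
      simp [ih]

-- single-character replace is a map
theorem pvReplaceSingle_go (a b : Char) : ∀ (fuel : Nat) (l acc : List Char), l.length ≤ fuel →
    PySem.Chars.replace.go [a] [b] fuel l acc
      = acc.reverse ++ l.map (fun c => if c = a then b else c) := by
  intro fuel
  induction fuel with
  | zero =>
    intro l acc h
    have : l = [] := by cases l <;> simp_all
    subst this; simp [PySem.Chars.replace.go]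
  | succ n ih =>
    intro l acc h
    match l with
    | [] => simp [PySem.Chars.replace.go]
    | c :: t =>
      rw [PySem.Chars.replace.go]
      simp only [List.length_cons] at h
      by_cases hc : c = a
      · subst hc
        have hp : ([c].isPrefixOf (c :: t)) = true := by simp [List.isPrefixOf]
        rw [if_pos hp]
        simp only [List.length_singleton, List.drop_succ_cons, List.drop_zero]
        rw [ih t ([b].reverse ++ acc) (by omega)]
        simp
      · have hp : ([a].isPrefixOf (c :: t)) = false := by
          simp [List.isPrefixOf]; exact fun h => hc h.symm
        rw [if_neg (by simp [hp])]
        rw [ih t (c :: acc) (by omega)]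
        simp [hc]

theorem pvReplaceSingle_eq (a b : Char) (l : List Char) :
    PySem.Chars.replace l [a] [b] = l.map (fun c => if c = a then b else c) := by
  rw [PySem.Chars.replace]
  simp only [List.isEmpty_cons, if_false, Bool.false_eq_true]
  exact pvReplaceSingle_go a b l.length l [] le_rfl

-- pvCol is invariant under one replace pass
theorem pvCol_pairRep (sep : Char) :
    ∀ (l : List Char) (p : Bool), pvCol sep p (pvPairRep sep l) = pvCol sep p l := by
  intro l
  induction l using pvPairRep.induct sep with
  | case1 => intro p; simp [pvPairRep]
  | case2 a => intro p; simp [pvPairRep]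
  | case3 a b t hab ih =>
    intro p
    rw [pvPairRep]; rw [if_pos hab]
    obtain ⟨ha, hb⟩ := hab
    rw [ha, hb]
    rw [pvCol]; rw [if_pos rfl]
    conv_rhs => rw [pvCol]; rw [if_pos rfl]
    cases p with
    | true =>
      simp only [if_pos]
      rw [ih true]
      conv_rhs => rw [pvCol]; rw [if_pos rfl]
      simp
    | false =>
      simp only [Bool.false_eq_true, if_false]
      rw [ih true]
      conv_rhs => rw [pvCol]; rw [if_pos rfl]
      simp
  | case4 a b t hab ih =>
    intro p
    rw [pvPairRep]; rw [if_neg hab]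
    by_cases ha : a = sep
    · rw [ha]
      rw [pvCol]; rw [if_pos rfl]
      conv_rhs => rw [pvCol]; rw [if_pos rfl]
      cases p <;> simp [ih true]
    · rw [pvCol]; rw [if_neg ha]
      conv_rhs => rw [pvCol]; rw [if_neg ha]
      simp [ih false]

-- where no double-sep occurs, pvCol is the identity
theorem pvCol_id (sep : Char) :
    ∀ (l : List Char), ¬ ([sep, sep] <:+: l) →
      ∀ (p : Bool), (p = true → l.head? ≠ some sep) → pvCol sep p l = l := by
  intro l
  induction l with
  | nil => intro _ p _; simp [pvCol]
  | cons c t ih =>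
    intro hni p hp
    have hnt : ¬ ([sep, sep] <:+: t) := fun h => hni (List.infix_cons_iff.2 (Or.inr h))
    by_cases hc : c = sep
    · have hpf : p = false := by
        cases p with
        | false => rfl
        | true => exact absurd (by simp [hc]) (hp rfl)
      subst hpf
      rw [pvCol]; rw [if_pos hc]
      simp only [Bool.false_eq_true, if_false]
      have hhead : t.head? ≠ some sep := by
        intro hh
        cases t with
        | nil => simp at hh
        | cons d t' =>
          simp at hh
          exact hni ⟨[], t', by simp [hh, hc]⟩
      rw [ih hnt true (fun _ => hhead), hc]
    · rw [pvCol]; rw [if_neg hc]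
      rw [ih hnt false (by simp)]

-- A's while loop computes pvCol
theorem pvCollapseLoop_eq_col (sep : Char) (l : List Char) :
    pvCollapseLoop sep l = pvCol sep false l := by
  induction hn : l.length using Nat.strong_induction_on generalizing l with
  | _ n ih =>
    by_cases h : PySem.Chars.isIn [sep, sep] l = true
    · rw [pvCollapseLoop]; rw [dif_pos h]
      have hlt := pvReplacePair_length_lt sep l h
      rw [ih _ (by omega) _ rfl]
      rw [pvReplacePair_eq]
      exact pvCol_pairRep sep l false
    · rw [pvCollapseLoop]; rw [dif_neg h]
      have hni : ¬ ([sep, sep] <:+: l) := by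
        intro hinf
        exact h ((PySem.Chars.isIn_iff_infix _ _).2 hinf)
      exact (pvCol_id sep l hni false (by simp)).symm

-- the two single-char replaces compose to the separator map
theorem pvMap_compose_underscore (l : List Char) :
    (l.map (fun c => if c = ' ' then '_' else c)).map (fun c => if c = '-' then '_' else c)
      = l.map (pvToSep '_') := by
  rw [List.map_map]
  apply List.map_congr_left
  intro c _
  simp only [Function.comp, pvToSep]
  by_cases h1 : c = ' ' <;> by_cases h2 : c = '-' <;> by_cases h3 : c = '_' <;> simp_all

theorem pvMap_compose_space (l : List Char) :
    (l.map (fun c => if c = '_' then ' ' else c)).map (fun c => if c = '-' then ' ' else c)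
      = l.map (pvToSep ' ') := by
  rw [List.map_map]
  apply List.map_congr_left
  intro c _
  simp only [Function.comp, pvToSep]
  by_cases h1 : c = ' ' <;> by_cases h2 : c = '-' <;> by_cases h3 : c = '_' <;> simp_all

theorem pvBranch_eq (sep : Char) (hsep : (sep == ' ' || sep == '-' || sep == '_') = true)
    (l m : List Char) (hm : m = l.map (pvToSep sep)) :
    pvCollapseLoop sep m = pvAltCore sep l := by
  rw [pvCollapseLoop_eq_col, pvAltCore_eq_sq, pvSq_eq_col_map sep hsep, hm]

-- ===== VERDICT (by name: the statement is the Claim_ definition above) =====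
theorem normalize_field_name_spec : Claim_equal_normalize_field_name := by
  intro field_name direction _ hpre
  unfold Spec_normalize_field_name
  unfold normalize_field_name normalize_field_name_alt
  rcases hpre with rfl | rfl
  · simp only [beq_self_eq_true, if_pos]
    congr 1
    congr 1
    apply pvBranch_eq '_' (by decide)
    simp only [PySem.Str.replace, String.toList_ofList]
    have e1 : (" " : String).toList = [' '] := by decide
    have e2 : ("-" : String).toList = ['-'] := by decide
    have e3 : ("_" : String).toList = ['_'] := by decide
    rw [e1, e2, e3]
    rw [pvReplaceSingle_eq, pvReplaceSingle_eq]
    exact pvMap_compose_underscore field_name.toList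
  · have h1 : (("to_space" : String) == "to_underscore") = false := by decide
    simp only [h1, Bool.false_eq_true, if_false, beq_self_eq_true, if_pos]
    congr 1
    congr 1
    apply pvBranch_eq ' ' (by decide)
    simp only [PySem.Str.replace, String.toList_ofList]
    have e1 : (" " : String).toList = [' '] := by decide
    have e2 : ("-" : String).toList = ['-'] := by decide
    have e3 : ("_" : String).toList = ['_'] := by decide
    rw [e1, e2, e3]
    rw [pvReplaceSingle_eq, pvReplaceSingle_eq]
    exact pvMap_compose_space field_name.toList
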